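-- pv_equiv track=rewrite | github.com/JustSynetiiXx/Genesis-V3 | beobachter.py | _operations_verteilung
-- ===== SOURCE A (Python) =====
-- def _operations_verteilung(genome_liste):
--     """Zählt Opcodes 0-10 über alle Genome."""
--     verteilung = [0] * 11
--     gesamt = 0
--     for genom in genome_liste:
--         for i in range(0, len(genom), 4):
--             opcode = genom[i]
--             if opcode < 11:
--                 verteilung[opcode] += 1
--             gesamt += 1
--     return verteilung, gesamt
-- ===== SOURCE B (Python) =====
-- def _operations_verteilung(genome_liste):
--     """Zählt Opcodes 0-10 über alle Genome (Counter-Dekomposition)."""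
--     counts = {}
--     gesamt = 0
--     for genom in genome_liste:
--         ops = genom[::4]
--         gesamt += len(ops)
--         for op in ops:
--             counts[op] = counts.get(op, 0) + 1
--     verteilung = [0] * 11
--     for op, c in counts.items():
--         if op < 11:
--             verteilung[op] += c
--     return verteilung, gesamt
-- ===== Notes on version B (the rewrite author's own statement) =====
-- stated objective: alternative
-- what changed: B slices each genome with step 4, aggregates opcode multiplicities in one dict (a Counter), and then does a single bulk pass over the distinct opcodes adding each count at once, instead of A's per-element index loop with one increment per opcode occurrence.
import Mathlib
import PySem

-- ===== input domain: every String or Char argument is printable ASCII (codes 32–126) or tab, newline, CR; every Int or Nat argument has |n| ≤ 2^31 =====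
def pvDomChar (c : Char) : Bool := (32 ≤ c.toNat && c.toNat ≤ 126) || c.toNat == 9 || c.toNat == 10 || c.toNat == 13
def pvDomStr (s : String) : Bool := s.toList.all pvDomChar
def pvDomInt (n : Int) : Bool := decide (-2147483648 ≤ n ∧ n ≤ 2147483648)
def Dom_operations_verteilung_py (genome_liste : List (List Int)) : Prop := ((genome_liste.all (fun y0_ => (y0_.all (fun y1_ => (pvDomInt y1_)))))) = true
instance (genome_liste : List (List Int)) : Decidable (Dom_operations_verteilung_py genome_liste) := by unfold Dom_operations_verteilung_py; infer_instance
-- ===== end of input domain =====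

-- ===== PORT A =====
-- B replaces A's per-opcode index loop and unit increments by a step-4 slice, a dict of
-- opcode multiplicities, and one bulk addition per distinct opcode (objective: alternative).
def operations_verteilung_py (genome_liste : List (List Int)) : List Int × Int :=
  -- verteilung = [0] * 11 ; gesamt = 0
  -- for genom in genome_liste: for i in range(0, len(genom), 4): …
  genome_liste.foldl (fun st genom =>
    (PySem.List.pyRange 0 (genom.length : Int) 4).foldl (fun st i =>
      let opcode := PySem.List.pyGetD genom i 0      -- genom[i]; i ∈ range(0,len,4) is always in range
      let verteilung :=
        if opcode < 11 then
          -- verteilung[opcode] += 1 (negative opcode indexes from the end; Pre_ keeps it in range)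
          PySem.List.pySetD st.1 opcode (PySem.List.pyGetD st.1 opcode 0 + 1)
        else st.1
      (verteilung, st.2 + 1)) st)
    (List.replicate 11 0, 0)

-- ===== PORT B =====
def operations_verteilung_py_alt (genome_liste : List (List Int)) : List Int × Int :=
  -- counts = {} ; gesamt = 0 ; for genom: ops = genom[::4]; gesamt += len(ops); count ops
  let st := genome_liste.foldl (fun (st : PySem.Dict Int Int × Int) genom =>
    let ops := (PySem.List.slice? genom none none 4).getD []   -- genom[::4] (step ≠ 0: never none)
    let gesamt := st.2 + (ops.length : Int)
    let counts := ops.foldl (fun d op => d.insert op (d.getD op 0 + 1)) st.1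
    (counts, gesamt)) (PySem.Dict.empty, 0)
  -- verteilung = [0]*11 ; for op, c in counts.items(): if op < 11: verteilung[op] += c
  let verteilung := st.1.items.foldl (fun v p =>
    if p.1 < 11 then PySem.List.pySetD v p.1 (PySem.List.pyGetD v p.1 0 + p.2) else v)
    (List.replicate 11 0)
  (verteilung, st.2)

-- ===== PRECONDITION & SPEC =====
-- Pre_ excludes exactly the inputs where the Python raises IndexError: some opcode (an element
-- at a step-4 position) with opcode < -11, i.e. `verteilung[opcode] += …` is out of range.
def Pre_operations_verteilung_py (genome_liste : List (List Int)) : Prop :=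
  ∀ genom ∈ genome_liste, ∀ i ∈ PySem.List.pyRange 0 (genom.length : Int) 4,
    -11 ≤ PySem.List.pyGetD genom i 0 ∨ 11 ≤ PySem.List.pyGetD genom i 0
instance (genome_liste : List (List Int)) : Decidable (Pre_operations_verteilung_py genome_liste) := by
  unfold Pre_operations_verteilung_py; infer_instance
def pvWitness_operations_verteilung_py : List (List Int) := [[0, 1, 2, 3, 10, 9, 8, 7, -3], [5], []]
def Spec_operations_verteilung_py (genome_liste : List (List Int)) (out : List Int × Int) : Prop := out = operations_verteilung_py_alt genome_liste
instance (genome_liste : List (List Int)) (out : List Int × Int) : Decidable (Spec_operations_verteilung_py genome_liste out) := by unfold Spec_operations_verteilung_py; infer_instance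

-- ===== CLAIM (what is proved, stated in full; the proofs are below) =====
def Claim_equal_operations_verteilung_py : Prop := ∀ (genome_liste : List (List Int)), Dom_operations_verteilung_py genome_liste → Pre_operations_verteilung_py genome_liste → Spec_operations_verteilung_py genome_liste (operations_verteilung_py genome_liste)

-- ===== LEMMAS AND PROOFS =====

-- the list of opcodes of one genome: the elements at indices 0, 4, 8, …
def pvOps (l : List Int) : List Int :=
  (List.range (((l.length : Int) + 3) / 4).toNat).map (fun k => l.getD (4 * k) 0)

-- opcode op is counted in slot j (negative opcodes index from the end of the 11-slot list)
def pvQ (j : Nat) (op : Int) : Bool := decide (op < 11 ∧ (if op < 0 then op + 11 else op) = (j : Int))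

-- one bulk add: `if op < 11: verteilung[op] += c` (B's loop body; A's body is the c = 1 case)
def pvAdd (v : List Int) (p : Int × Int) : List Int :=
  if p.1 < 11 then PySem.List.pySetD v p.1 (PySem.List.pyGetD v p.1 0 + p.2) else v

theorem pvOps_range (l : List Int) :
    (PySem.List.pyRange 0 (l.length : Int) 4).map (fun i => PySem.List.pyGetD l i 0) = pvOps l := by
  rw [PySem.List.pyRange_of_pos 0 (l.length : Int) (by norm_num), List.map_map, pvOps]
  have hcnt : (if (0:Int) < l.length then (((l.length:Int) - 0 + 4 - 1) / 4).toNat else 0)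
      = (((l.length : Int) + 3) / 4).toNat := by
    split
    · have h : (l.length:Int) - 0 + 4 - 1 = (l.length:Int) + 3 := by ring
      rw [h]
    · have h0 : (l.length : Int) = 0 := by omega
      rw [h0]; decide
  rw [hcnt]
  refine List.map_congr_left (fun k hk => ?_)
  have h0 : (0:Int) ≤ 0 + 4 * (k:Int) := by positivity
  rw [Function.comp_apply, PySem.List.pyGetD_of_nonneg l 0 h0]
  congr 1
  omega

theorem pvOps_slice (l : List Int) :
    (PySem.List.slice? l none none 4).getD [] = pvOps l := by
  rw [PySem.List.slice?]
  norm_num [PySem.List.sliceIndices]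
  have hcnt : (if 0 < l.length then (((l.length:Int) + 4 - 1) / 4).toNat else 0)
      = (((l.length : Int) + 3) / 4).toNat := by
    split
    · have h : (l.length:Int) + 4 - 1 = (l.length:Int) + 3 := by ring
      rw [h]
    · have h0 : l.length = 0 := by omega
      simp [h0]
  rw [hcnt, pvOps]
  have hcong : ∀ k ∈ List.range (((l.length : Int) + 3) / 4).toNat,
      l[(4 * (k:Int)).toNat]? = (some ∘ fun k => l.getD (4 * k) 0) k := by
    intro k hk
    rw [List.mem_range] at hk
    have h4 : 4 * k < l.length := by omega
    have ht : (4 * (k:Int)).toNat = 4 * k := by omega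
    rw [ht, List.getElem?_eq_getElem h4, Function.comp_apply, List.getD_eq_getElem l 0 h4]
  rw [List.filterMap_congr hcong, List.filterMap_eq_map]

theorem pvAdd_length (v : List Int) (p : Int × Int) : (pvAdd v p).length = v.length := by
  unfold pvAdd; split; · simp [PySem.List.length_pySetD]
  · rfl

theorem pvAdd_entry (v : List Int) (p : Int × Int) (hv : v.length = 11)
    (hop : -11 ≤ p.1 ∨ 11 ≤ p.1) (j : Nat) (hj : j < 11) :
    (pvAdd v p).getD j 0 = v.getD j 0 + (if pvQ j p.1 then p.2 else 0) := by
  unfold pvAdd pvQ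
  by_cases hlt : p.1 < 11
  · have hge : -11 ≤ p.1 := by omega
    simp only [hlt, if_true]
    have hidx : PySem.List.pyIdx? v.length p.1
        = some (if p.1 < 0 then (p.1 + 11).toNat else p.1.toNat) := by
      rw [hv]; unfold PySem.List.pyIdx?
      by_cases hneg : p.1 < 0
      · rw [if_pos hneg, if_neg (show ¬ (0:ℤ) ≤ p.1 by omega),
          if_pos (show -((11:ℕ):ℤ) ≤ p.1 by push_cast; omega)]
        congr 1; omega
      · rw [if_neg hneg, if_pos (show (0:ℤ) ≤ p.1 by omega),
          if_pos (show p.1 < ((11:ℕ):ℤ) by push_cast; omega)]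
    set k := (if p.1 < 0 then (p.1 + 11).toNat else p.1.toNat) with hkdef
    have hk : k < 11 := by rw [hkdef]; split <;> omega
    rw [PySem.List.pySetD, PySem.List.pySet?, hidx, Option.map_some, Option.getD_some,
      PySem.List.pyGetD, PySem.List.pyGet?, hidx]
    rw [show ((some k).bind fun k => v[k]?) = v[k]? from rfl]
    rw [List.getD_eq_getElem?_getD, List.getElem?_set, List.getD_eq_getElem?_getD]
    by_cases hkj : k = j
    · have hq : (p.1 < 11 ∧ (if p.1 < 0 then p.1 + 11 else p.1) = (j : Int)) := by
        refine ⟨hlt, ?_⟩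
        rw [hkdef] at hkj; split at hkj <;> split <;> omega
      simp only [hkj, if_true, hq, hv, hj, List.getElem?_eq_getElem (hv ▸ hj)]
      simp
    · have hs : (if p.1 < 0 then p.1 + 11 else p.1) ≠ (j : Int) := by
        rw [hkdef] at hkj
        by_cases hneg : p.1 < 0 <;> simp only [hneg, if_true, if_false] at hkj ⊢ <;> omega
      simp [hkj, hs]
  · simp [hlt]

theorem pvAdd_fold_length (items : List (Int × Int)) (v : List Int) :
    (items.foldl pvAdd v).length = v.length := by
  induction items generalizing v with
  | nil => rfl
  | cons p t ih => simp [List.foldl_cons, ih, pvAdd_length]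

theorem pvAdd_fold_entry (items : List (Int × Int)) (v : List Int) (hv : v.length = 11)
    (hop : ∀ p ∈ items, -11 ≤ p.1 ∨ 11 ≤ p.1) (j : Nat) (hj : j < 11) :
    (items.foldl pvAdd v).getD j 0
      = v.getD j 0 + ((items.filter (fun p => pvQ j p.1)).map (·.2)).sum := by
  induction items generalizing v with
  | nil => simp
  | cons p t ih =>
      have h1 := pvAdd_entry v p hv (hop p (by simp)) j hj
      have h2 := ih (pvAdd v p) (by rw [pvAdd_length, hv]) (fun q hq => hop q (by simp [hq]))
      simp only [List.foldl_cons, h2, h1, List.filter_cons]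
      by_cases hq : pvQ j p.1 = true
      · simp [hq]
        ring
      · simp [hq]

theorem pvStepA (L : List Int) (v : List Int) (n : Int) :
    L.foldl (fun st op => (pvAdd st.1 (op, 1), st.2 + 1)) (v, n)
      = ((L.map (fun op => (op, (1 : Int)))).foldl pvAdd v, n + L.length) := by
  induction L generalizing v n with
  | nil => simp
  | cons a t ih =>
      simp only [List.foldl_cons, List.map_cons, ih, List.length_cons]
      refine Prod.ext rfl ?_
      push_cast; ring

-- A's whole computation, flattened to one fold over all opcodes
theorem pvA_eq (gl : List (List Int)) :
    operations_verteilung_py gl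
      = (((gl.map pvOps).flatten.map (fun op => (op, (1 : Int)))).foldl pvAdd (List.replicate 11 0),
         ((gl.map pvOps).flatten.length : Int)) := by
  unfold operations_verteilung_py
  have hbody : ∀ (st : List Int × Int) (genom : List Int),
      (PySem.List.pyRange 0 (genom.length : Int) 4).foldl (fun st i =>
        let opcode := PySem.List.pyGetD genom i 0
        let verteilung :=
          if opcode < 11 then
            PySem.List.pySetD st.1 opcode (PySem.List.pyGetD st.1 opcode 0 + 1)
          else st.1
        (verteilung, st.2 + 1)) st
      = (pvOps genom).foldl (fun st op => (pvAdd st.1 (op, 1), st.2 + 1)) st := by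
    intro st genom
    rw [← pvOps_range genom, List.foldl_map]
    rfl
  simp only [hbody]
  rw [← List.foldl_map (f := pvOps)
        (g := fun st (l : List Int) => l.foldl (fun st op => (pvAdd st.1 (op, 1), st.2 + 1)) st),
      ← List.foldl_flatten, pvStepA]
  simp

theorem pvStepB (gl : List (List Int)) (d : PySem.Dict Int Int) (g : Int) :
    gl.foldl (fun (st : PySem.Dict Int Int × Int) genom =>
      (((PySem.List.slice? genom none none 4).getD []).foldl
          (fun d op => d.insert op (d.getD op 0 + 1)) st.1,
       st.2 + ((((PySem.List.slice? genom none none 4).getD []).length : Nat) : Int))) (d, g)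
      = ((gl.map pvOps).flatten.foldl (fun d op => d.insert op (d.getD op 0 + 1)) d,
         g + ((gl.map pvOps).flatten.length : Int)) := by
  induction gl generalizing d g with
  | nil => simp
  | cons genom t ih =>
      simp only [List.foldl_cons, List.map_cons, List.flatten_cons, pvOps_slice] at ih ⊢
      rw [ih, List.foldl_append, List.length_append]
      refine Prod.ext rfl ?_
      push_cast; ring

-- B's dict/gesamt state, flattened
theorem pvB_eq (gl : List (List Int)) :
    operations_verteilung_py_alt gl
      = (((PySem.Dict.counter (gl.map pvOps).flatten).items).foldl pvAdd (List.replicate 11 0),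
         ((gl.map pvOps).flatten.length : Int)) := by
  unfold operations_verteilung_py_alt
  dsimp only []
  rw [pvStepB, PySem.Dict.foldl_insert_getD_add_one_eq_counter]
  simp only [zero_add]
  rfl

theorem pvOps_mem_pre (gl : List (List Int)) (h : Pre_operations_verteilung_py gl) :
    ∀ op ∈ (gl.map pvOps).flatten, -11 ≤ op ∨ 11 ≤ op := by
  intro op hop
  rw [List.mem_flatten] at hop
  obtain ⟨l, hl, hop⟩ := hop
  rw [List.mem_map] at hl
  obtain ⟨genom, hg, rfl⟩ := hl
  rw [← pvOps_range, List.mem_map] at hop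
  obtain ⟨i, hi, rfl⟩ := hop
  exact h genom hg i hi

-- the two per-slot totals agree: unit increments vs one bulk add per distinct opcode
theorem pv_sums (L : List Int) (j : Nat) :
    (((PySem.Dict.counter L).items.filter (fun p => pvQ j p.1)).map (·.2)).sum
      = (((L.map (fun op => (op, (1 : Int)))).filter (fun p => pvQ j p.1)).map (·.2)).sum := by
  have hperm : (PySem.Set.ofList L).Perm L.dedup :=
    (List.perm_ext_iff_of_nodup (PySem.Set.nodup_ofList L) L.nodup_dedup).2
      (fun a => by rw [PySem.Set.mem_ofList, List.mem_dedup])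
  rw [PySem.Dict.items_counter, List.filter_map, List.filter_map, List.map_map, List.map_map]
  have e1 : ((fun p : Int × Int => pvQ j p.1) ∘ fun k => (k, (L.count k : Int))) = fun k => pvQ j k := rfl
  have e2 : ((Prod.snd : Int × Int → Int) ∘ fun k => (k, (L.count k : Int)))
      = (fun n : Nat => (n : Int)) ∘ (fun k => L.count k) := rfl
  have e3 : ((fun p : Int × Int => pvQ j p.1) ∘ fun op => (op, (1 : Int))) = fun op => pvQ j op := rfl
  have e4 : ((Prod.snd : Int × Int → Int) ∘ fun op => (op, (1 : Int))) = fun _ => (1 : Int) := rfl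
  rw [e1, e2, e3, e4]
  rw [((hperm.filter _).map _).sum_eq]
  rw [← List.map_map, ← Nat.cast_list_sum, List.sum_map_count_dedup_filter_eq_countP]
  rw [PySem.List.sum_map_const_int, mul_one, List.countP_eq_length_filter]

-- ===== VERDICT (by name: the statement is the Claim_ definition above) =====
theorem operations_verteilung_py_spec : Claim_equal_operations_verteilung_py := by
  intro gl _ hpre
  unfold Spec_operations_verteilung_py
  rw [pvA_eq, pvB_eq]
  have hops := pvOps_mem_pre gl hpre
  refine Prod.ext ?_ rfl
  set L := (gl.map pvOps).flatten with hL
  have h1 : ∀ p ∈ L.map (fun op => (op, (1 : Int))), -11 ≤ p.1 ∨ 11 ≤ p.1 := by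
    intro p hp; rw [List.mem_map] at hp; obtain ⟨op, hop, rfl⟩ := hp; exact hops op hop
  have h2 : ∀ p ∈ (PySem.Dict.counter L).items, -11 ≤ p.1 ∨ 11 ≤ p.1 := by
    intro p hp
    rw [PySem.Dict.items_counter, List.mem_map] at hp
    obtain ⟨k, hk, rfl⟩ := hp
    exact hops k ((PySem.Set.mem_ofList L k).mp hk)
  apply List.ext_getElem
  · rw [pvAdd_fold_length, pvAdd_fold_length]
  · intro i hA hB
    have hlen : i < 11 := by simpa [pvAdd_fold_length] using hA
    rw [← List.getD_eq_getElem _ 0 hA, ← List.getD_eq_getElem _ 0 hB]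
    rw [pvAdd_fold_entry _ _ (by simp) h2 i hlen, pvAdd_fold_entry _ _ (by simp) h1 i hlen,
      pv_sums]
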